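-- pv_equiv track=rewrite | github.com/social-agent-lab/autopop-persona | household_clustering_agent.py | _compute_selection_statistics
-- ===== SOURCE A (Python) =====
-- from typing import Dict, List, Tuple, Any, Optional
--
-- def _compute_selection_statistics(selected_fields: List[Dict]) -> Dict:
--     """Calculate statistics for selected fields"""
--     n_continuous = sum(1 for f in selected_fields if f['type'] == 'continuous')
--     n_categorical = sum(1 for f in selected_fields if f['type'] == 'categorical')
--
--     return {
--         'total_selected': len(selected_fields),
--         'n_continuous': n_continuous,
--         'n_categorical': n_categorical
--     }
-- ===== SOURCE B (Python) =====
-- def _compute_selection_statistics(selected_fields):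
--     """Calculate statistics for selected fields (divide-and-conquer over halves)"""
--     def stats(fields):
--         n = len(fields)
--         if n == 0:
--             return (0, 0, 0)
--         if n == 1:
--             t = fields[0]['type']
--             return (1, 1 if t == 'continuous' else 0, 1 if t == 'categorical' else 0)
--         mid = n // 2
--         t1, c1, k1 = stats(fields[:mid])
--         t2, c2, k2 = stats(fields[mid:])
--         return (t1 + t2, c1 + c2, k1 + k2)
--     total, n_continuous, n_categorical = stats(selected_fields)
--     return {
--         'total_selected': total,
--         'n_continuous': n_continuous,
--         'n_categorical': n_categorical
--     }
-- ===== Notes on version B (the rewrite author's own statement) =====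
-- stated objective: alternative
-- what changed: Replaces the two linear predicate scans by a divide-and-conquer recursion: the list is split in halves, each half returns a (total, n_continuous, n_categorical) triple, and triples are combined by componentwise addition; correct because all three statistics are additive over list concatenation.
import Mathlib
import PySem

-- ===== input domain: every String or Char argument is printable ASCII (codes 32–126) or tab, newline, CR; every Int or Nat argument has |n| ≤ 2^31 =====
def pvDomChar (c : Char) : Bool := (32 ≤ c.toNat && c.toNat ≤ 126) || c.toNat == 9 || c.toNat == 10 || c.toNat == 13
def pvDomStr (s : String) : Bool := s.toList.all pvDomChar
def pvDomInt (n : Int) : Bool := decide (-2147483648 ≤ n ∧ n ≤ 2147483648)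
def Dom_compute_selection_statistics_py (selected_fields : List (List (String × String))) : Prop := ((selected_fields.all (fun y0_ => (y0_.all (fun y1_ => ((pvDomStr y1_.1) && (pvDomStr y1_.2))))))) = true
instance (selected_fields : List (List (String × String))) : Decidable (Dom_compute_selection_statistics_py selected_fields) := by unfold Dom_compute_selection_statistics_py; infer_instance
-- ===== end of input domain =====

-- B replaces A's two linear predicate scans by a divide-and-conquer recursion combining
-- (total, n_continuous, n_categorical) triples over halves (objective: alternative).

-- ===== PORT A =====
-- f['type'] on the dict f (first-match association-list lookup)
def lookType (f : List (String × String)) : Option String := (PySem.Dict.ofList f).get? "type"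

def compute_selection_statistics_py (selected_fields : List (List (String × String))) : List (String × Int) :=
  let n_continuous : Int := selected_fields.foldl (fun acc f => if lookType f = some "continuous" then acc + 1 else acc) 0
  let n_categorical : Int := selected_fields.foldl (fun acc f => if lookType f = some "categorical" then acc + 1 else acc) 0
  [("total_selected", (selected_fields.length : Int)),
   ("n_continuous", n_continuous),
   ("n_categorical", n_categorical)]

-- ===== PORT B =====
-- the inner 'stats': split the list at len//2, recurse on the halves, add the triples
def statsDC (fields : List (List (String × String))) : Int × Int × Int :=
  match fields with
  | [] => (0, 0, 0)
  | [f] =>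
    (match lookType f with
     | some t => (1, if t = "continuous" then 1 else 0, if t = "categorical" then 1 else 0)
     | none => (1, 0, 0))   -- unreachable under Pre_ (KeyError in Python)
  | f1 :: f2 :: rest =>
    let mid := (f1 :: f2 :: rest).length / 2
    let l := statsDC ((f1 :: f2 :: rest).take mid)
    let r := statsDC ((f1 :: f2 :: rest).drop mid)
    (l.1 + r.1, l.2.1 + r.2.1, l.2.2 + r.2.2)
termination_by fields.length
decreasing_by
  · simp [List.length_take]; omega
  · simp; omega

def compute_selection_statistics_py_alt (selected_fields : List (List (String × String))) : List (String × Int) :=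
  let s := statsDC selected_fields
  [("total_selected", s.1),
   ("n_continuous", s.2.1),
   ("n_categorical", s.2.2)]

-- ===== PRECONDITION & SPEC =====
-- Pre_ excludes exactly the inputs containing a field without a 'type' key, on which both A and B raise KeyError.
def Pre_compute_selection_statistics_py (selected_fields : List (List (String × String))) : Prop :=
  ∀ f ∈ selected_fields, (lookType f).isSome
instance (selected_fields : List (List (String × String))) : Decidable (Pre_compute_selection_statistics_py selected_fields) := by unfold Pre_compute_selection_statistics_py; infer_instance
def pvWitness_compute_selection_statistics_py : (List (List (String × String))) :=
  [[("type", "continuous")], [("type", "categorical"), ("name", "x")]]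

def Spec_compute_selection_statistics_py (selected_fields : List (List (String × String))) (out : List (String × Int)) : Prop := out = compute_selection_statistics_py_alt selected_fields
instance (selected_fields : List (List (String × String))) (out : List (String × Int)) : Decidable (Spec_compute_selection_statistics_py selected_fields out) := by unfold Spec_compute_selection_statistics_py; infer_instance

-- ===== CLAIM (what is proved, stated in full; the proofs are below) =====
def Claim_equal_compute_selection_statistics_py : Prop := ∀ (selected_fields : List (List (String × String))), Dom_compute_selection_statistics_py selected_fields → Pre_compute_selection_statistics_py selected_fields → Spec_compute_selection_statistics_py selected_fields (compute_selection_statistics_py selected_fields)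

-- ===== LEMMAS AND PROOFS =====

-- the divide-and-conquer triple is (length, #continuous, #categorical) — the three statistics are additive over ++
lemma statsDC_eq (fields : List (List (String × String))) :
    statsDC fields = ((fields.length : Int),
                      (fields.countP (fun f => lookType f == some "continuous") : Int),
                      (fields.countP (fun f => lookType f == some "categorical") : Int)) := by
  fun_induction statsDC fields
  case case1 => simp
  case case2 => rename_i f t h; simp [h]
  case case3 => rename_i f h; simp [h]
  case case4 =>
    rename_i g1 g2 grest mid l r ihl ihr
    have hcount : ∀ p : List (String × String) → Bool,
        ((g1 :: g2 :: grest).take mid).countP p + ((g1 :: g2 :: grest).drop mid).countP p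
          = (g1 :: g2 :: grest).countP p := by
      intro p; rw [← List.countP_append, List.take_append_drop]
    show (l.1 + r.1, l.2.1 + r.2.1, l.2.2 + r.2.2) = _
    simp only [l, r, ihl, ihr]
    refine Prod.ext ?_ (Prod.ext ?_ ?_)
    · simp [List.length_take, List.length_drop]; omega
    · simp only []; rw [← hcount]; push_cast; ring
    · simp only []; rw [← hcount]; push_cast; ring

-- A's counting fold equals countP
lemma foldA_count (sf : List (List (String × String))) (k : String) (a : Int) :
    sf.foldl (fun acc f => if lookType f = some k then acc + 1 else acc) a
      = a + (sf.countP (fun f => lookType f == some k) : Int) := by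
  induction sf generalizing a with
  | nil => simp
  | cons f t ih =>
    simp only [List.foldl_cons, ih, List.countP_cons]
    by_cases h : lookType f = some k
    · simp [h]; ring
    · simp [h]

-- ===== VERDICT (by name: the statement is the Claim_ definition above) =====
theorem compute_selection_statistics_py_spec : Claim_equal_compute_selection_statistics_py := by
  intro sf _ _
  unfold Spec_compute_selection_statistics_py compute_selection_statistics_py compute_selection_statistics_py_alt
  simp only [statsDC_eq, foldA_count, zero_add]
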